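-- pv_equiv track=rewrite | github.com/ai-shubham-mishra/Automated_Invoicing | app.py | get_productname_col_from_cols
-- ===== SOURCE A (Python) =====
-- def get_productname_col_from_cols(cols: list[str]) -> str | None:
--     # Prefer exact 'Produktname'
--     for c in cols:
--         if c == "Produktname":
--             return c
--     # Fallback case-insensitive trimmed match
--     for c in cols:
--         if str(c).strip().lower() == "produktname":
--             return c
--     # As an absolute fallback, accept 'Name'
--     for c in cols:
--         if c == "Name" or str(c).strip().lower() == "name":
--             return c
--     return None
-- ===== SOURCE B (Python) =====
-- def get_productname_col_from_cols(cols: list[str]) -> str | None: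
--     # Single pass: track first case-insensitive and first 'Name' candidates;
--     # exact 'Produktname' wins immediately.
--     cand_ci = None
--     cand_name = None
--     for c in cols:
--         if c == "Produktname":
--             return c
--         t = str(c).strip().lower()
--         if cand_ci is None and t == "produktname":
--             cand_ci = c
--         if cand_name is None and (c == "Name" or t == "name"):
--             cand_name = c
--     return cand_ci if cand_ci is not None else cand_name
-- ===== Notes on version B (the rewrite author's own statement) =====
-- stated objective: simpler
-- what changed: Replaces A's three sequential scans of cols with a single pass that returns on an exact 'Produktname' hit and tracks the first case-insensitive and first 'Name' candidates in two variables.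
import Mathlib
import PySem

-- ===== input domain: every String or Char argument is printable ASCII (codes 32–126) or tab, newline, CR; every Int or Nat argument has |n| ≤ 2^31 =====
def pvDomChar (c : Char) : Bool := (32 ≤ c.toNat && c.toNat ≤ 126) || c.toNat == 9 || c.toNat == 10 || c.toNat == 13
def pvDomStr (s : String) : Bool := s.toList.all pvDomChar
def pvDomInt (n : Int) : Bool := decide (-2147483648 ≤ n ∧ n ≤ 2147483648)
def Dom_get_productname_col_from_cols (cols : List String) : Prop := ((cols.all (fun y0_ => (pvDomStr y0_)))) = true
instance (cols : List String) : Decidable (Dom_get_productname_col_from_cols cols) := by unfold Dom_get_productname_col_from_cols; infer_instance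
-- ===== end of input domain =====

-- B replaces A's three sequential scans with one pass keeping two candidate variables (simpler).

-- str(c).strip().lower() for a string c
def pvNorm (s : String) : String := PySem.Str.lower (PySem.Str.strip s)

-- ===== PORT A =====
-- first loop: exact 'Produktname'
def pvLoop1 : List String → Option String
  | [] => none
  | c :: r => if c = "Produktname" then some c else pvLoop1 r

-- second loop: trimmed case-insensitive match
def pvLoop2 : List String → Option String
  | [] => none
  | c :: r => if pvNorm c = "produktname" then some c else pvLoop2 r

-- third loop: 'Name' fallback
def pvLoop3 : List String → Option String
  | [] => none
  | c :: r => if c = "Name" ∨ pvNorm c = "name" then some c else pvLoop3 r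

def get_productname_col_from_cols (cols : List String) : Option String :=
  match pvLoop1 cols with
  | some c => some c
  | none =>
    match pvLoop2 cols with
    | some c => some c
    | none =>
      match pvLoop3 cols with
      | some c => some c
      | none => none

-- ===== PORT B =====
-- single pass carrying the two candidate variables (cand_ci, cand_name)
def pvGoB : List String → Option String → Option String → Option String
  | [], candCi, candName => match candCi with | some c => some c | none => candName
  | c :: r, candCi, candName =>
    if c = "Produktname" then some c
    else
      let t := pvNorm c
      pvGoB r
        (if candCi.isNone ∧ t = "produktname" then some c else candCi)
        (if candName.isNone ∧ (c = "Name" ∨ t = "name") then some c else candName)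

def get_productname_col_from_cols_alt (cols : List String) : Option String :=
  pvGoB cols none none

-- ===== PRECONDITION & SPEC =====
def Spec_get_productname_col_from_cols (cols : List String) (out : Option String) : Prop := out = get_productname_col_from_cols_alt cols
instance (cols : List String) (out : Option String) : Decidable (Spec_get_productname_col_from_cols cols out) := by unfold Spec_get_productname_col_from_cols; infer_instance

-- ===== CLAIM (what is proved, stated in full; the proofs are below) =====
def Claim_equal_get_productname_col_from_cols : Prop := ∀ (cols : List String), Dom_get_productname_col_from_cols cols → Spec_get_productname_col_from_cols cols (get_productname_col_from_cols cols)

-- ===== LEMMAS AND PROOFS =====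

-- invariant of B's single pass: it equals tier1, else the pending/fresh tier2, else the pending/fresh tier3
theorem pvGoB_eq (cols : List String) : ∀ (c2 c3 : Option String),
    pvGoB cols c2 c3 =
      match pvLoop1 cols with
      | some c => some c
      | none =>
        match (match c2 with | some x => some x | none => pvLoop2 cols) with
        | some c => some c
        | none => match c3 with | some x => some x | none => pvLoop3 cols := by
  induction cols with
  | nil => intro c2 c3; cases c2 <;> cases c3 <;> simp [pvGoB, pvLoop1, pvLoop2, pvLoop3]
  | cons c r ih =>
    intro c2 c3
    by_cases h1 : c = "Produktname"
    · simp [pvGoB, pvLoop1, h1]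
    · rw [show pvGoB (c :: r) c2 c3 =
        pvGoB r (if c2.isNone ∧ pvNorm c = "produktname" then some c else c2)
                (if c3.isNone ∧ (c = "Name" ∨ pvNorm c = "name") then some c else c3) by
          simp [pvGoB, h1]]
      rw [ih]
      cases c2 <;> cases c3 <;>
        by_cases h2 : pvNorm c = "produktname" <;>
        by_cases h3 : c = "Name" ∨ pvNorm c = "name" <;>
        simp [pvLoop1, pvLoop2, pvLoop3, h1, h2, h3]

-- ===== VERDICT (by name: the statement is the Claim_ definition above) =====
theorem get_productname_col_from_cols_spec : Claim_equal_get_productname_col_from_cols := by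
  intro cols _
  unfold Spec_get_productname_col_from_cols get_productname_col_from_cols get_productname_col_from_cols_alt
  rw [pvGoB_eq]
  rcases pvLoop1 cols <;> rcases pvLoop2 cols <;> rcases pvLoop3 cols <;> simp
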